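-- pv_equiv track=rewrite | github.com/huy-nguyen/2019-advent-of-code | day_08.py | get_graphical_representation
-- ===== SOURCE A (Python) =====
-- import itertools
-- from typing import List
--
-- def get_graphical_representation(image_pixels: List[int], width: int, height: int):
--     rows: List[str] = []
--     current_row = ""
--     for pixel_value, row_index in zip(image_pixels, itertools.cycle(range(width))):
--         graphical_representation = " " if pixel_value == 0 else "X"
--         current_row += graphical_representation
--         if row_index == width - 1:
--             rows.append(current_row)
--             current_row = ""
--     return rows
-- ===== SOURCE B (Python) =====
-- def get_graphical_representation(image_pixels, width, height):
--     if width <= 0: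
--         return []
--     s = "".join(" " if p == 0 else "X" for p in image_pixels)
--     n = len(s) - len(s) % width
--     return [s[i:i + width] for i in range(0, n, width)]
-- ===== Notes on version B (the rewrite author's own statement) =====
-- stated objective: alternative
-- what changed: A's single interleaved accumulate-and-flush loop (building each row by repeated string concatenation and flushing when the cycled row index hits width-1) is replaced by two separate bulk passes: map every pixel to its character with one join, then reshape by slicing the full string into width-sized pieces over range(0, len - len % width, width), which drops the trailing partial row exactly as A does.
import Mathlib
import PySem

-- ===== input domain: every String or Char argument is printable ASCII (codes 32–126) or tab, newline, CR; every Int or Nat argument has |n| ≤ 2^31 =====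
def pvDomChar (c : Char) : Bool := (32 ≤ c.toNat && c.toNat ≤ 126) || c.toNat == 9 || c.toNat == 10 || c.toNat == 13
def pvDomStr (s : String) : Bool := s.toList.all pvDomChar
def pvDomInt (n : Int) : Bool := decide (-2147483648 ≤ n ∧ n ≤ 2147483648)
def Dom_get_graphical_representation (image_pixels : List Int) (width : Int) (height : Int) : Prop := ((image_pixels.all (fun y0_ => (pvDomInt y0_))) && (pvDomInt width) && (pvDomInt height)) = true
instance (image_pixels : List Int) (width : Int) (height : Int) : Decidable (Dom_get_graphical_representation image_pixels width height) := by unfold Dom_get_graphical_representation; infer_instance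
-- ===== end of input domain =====

-- ===== PORT A =====
-- B re-implements A as a map-then-slice two-pass (different decomposition, same cost); A's
-- interleaved accumulate-and-flush loop is kept literally below. Strings are built via their
-- char lists (String.ofList) so the kernel can evaluate them.
-- Loop of A: zip(image_pixels, itertools.cycle(range(width))); the cycled row_index is carried
-- explicitly (0 .. width-1, reset after a flush). For width <= 0, cycle(range(width)) is empty,
-- so the loop body never runs and the result is [].
def gcrLoop (width : Int) (pixels : List Int) (rowIndex : Int) (rows : List String) (cur : List Char) : List String :=
  match pixels with
  | [] => rows
  | p :: ps =>
    let g : Char := if p = 0 then ' ' else 'X'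
    let cur2 := cur ++ [g]
    if rowIndex = width - 1 then gcrLoop width ps 0 (rows ++ [String.ofList cur2]) []
    else gcrLoop width ps (rowIndex + 1) rows cur2

def get_graphical_representation (image_pixels : List Int) (width : Int) (height : Int) : List String :=
  if width ≤ 0 then [] else gcrLoop width image_pixels 0 [] []

-- ===== PORT B =====
-- Source B: guard degenerate width; s = ''.join(' ' if p==0 else 'X' for p in image_pixels);
-- n = len(s) - len(s) % width; [s[i:i+width] for i in range(0, n, width)]
def get_graphical_representation_alt (image_pixels : List Int) (width : Int) (height : Int) : List String :=
  if width ≤ 0 then []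
  else
    let s : List Char := image_pixels.map (fun p => if p = 0 then ' ' else 'X')
    let n : Int := (s.length : Int) - PySem.Int.mod (s.length : Int) width
    (PySem.List.pyRange 0 n width).map (fun i => String.ofList (PySem.List.slice s (some i) (some (i + width))))

-- ===== PRECONDITION & SPEC =====
def Spec_get_graphical_representation (image_pixels : List Int) (width : Int) (height : Int) (out : List String) : Prop := out = get_graphical_representation_alt image_pixels width height
instance (image_pixels : List Int) (width : Int) (height : Int) (out : List String) : Decidable (Spec_get_graphical_representation image_pixels width height out) := by unfold Spec_get_graphical_representation; infer_instance

-- ===== CLAIM (what is proved, stated in full; the proofs are below) =====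
def Claim_equal_get_graphical_representation : Prop := ∀ (image_pixels : List Int) (width : Int) (height : Int), Dom_get_graphical_representation image_pixels width height → Spec_get_graphical_representation image_pixels width height (get_graphical_representation image_pixels width height)

-- ===== LEMMAS AND PROOFS =====

-- Common characterisation both ports are reduced to: the list of full width-sized chunks of cs.
def pvChunk (w : Nat) (cs : List Char) : List String :=
  if h : 0 < w ∧ w ≤ cs.length then String.ofList (cs.take w) :: pvChunk w (cs.drop w)
  else []
termination_by cs.length
decreasing_by simp; omega

theorem pvChunk_nil_of_lt {w : Nat} {cs : List Char} (h : cs.length < w) : pvChunk w cs = [] := by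
  rw [pvChunk, dif_neg]
  omega

theorem pvChunk_append {w : Nat} {cs rest : List Char} (hw : 0 < w) (h : cs.length = w) :
    pvChunk w (cs ++ rest) = String.ofList cs :: pvChunk w rest := by
  subst h
  rw [pvChunk, dif_pos (by simp [hw])]
  rw [List.take_append_of_le_length (by omega), List.drop_append_of_le_length (by omega)]
  simp

theorem gcrLoop_eq (width : Int) (hw : 0 < width) :
    ∀ (pixels : List Int) (cur : List Char) (rows : List String) (idx : Int),
      idx = (cur.length : Int) → cur.length < width.toNat →
      gcrLoop width pixels idx rows cur
        = rows ++ pvChunk width.toNat (cur ++ pixels.map (fun p => if p = 0 then ' ' else 'X')) := by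
  intro pixels
  induction pixels with
  | nil =>
    intro cur rows idx hidx hcur
    simp [gcrLoop, pvChunk_nil_of_lt hcur]
  | cons p ps ih =>
    intro cur rows idx hidx hcur
    subst hidx
    by_cases hflush : (cur.length : Int) = width - 1
    · have hlen : (cur ++ [if p = 0 then ' ' else 'X']).length = width.toNat := by
        simp; omega
      rw [gcrLoop]
      simp only [if_pos hflush]
      rw [ih [] (rows ++ [String.ofList (cur ++ [if p = 0 then ' ' else 'X'])]) 0 (by simp)
            (by simp; omega)]
      rw [List.map_cons]
      have hsplit : cur ++ (if p = 0 then ' ' else 'X') :: ps.map (fun p => if p = 0 then ' ' else 'X')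
           = (cur ++ [if p = 0 then ' ' else 'X']) ++ ps.map (fun p => if p = 0 then ' ' else 'X') := by
        simp
      rw [hsplit, pvChunk_append (by omega) hlen]
      simp
    · rw [gcrLoop]
      simp only [if_neg hflush]
      rw [ih (cur ++ [if p = 0 then ' ' else 'X']) rows ((cur.length : Int) + 1) (by simp)
            (by simp; omega)]
      simp

theorem pvChunk_eq_rangeMap (w : Nat) (hw : 0 < w) (cs : List Char) :
    pvChunk w cs
      = (List.range (cs.length / w)).map (fun k => String.ofList ((cs.drop (w * k)).take w)) := by
  by_cases h : w ≤ cs.length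
  · rw [pvChunk, dif_pos ⟨hw, h⟩, pvChunk_eq_rangeMap w hw (cs.drop w)]
    have hdiv : cs.length / w = (cs.drop w).length / w + 1 := by
      rw [List.length_drop]
      exact Nat.div_eq_sub_div hw h
    rw [hdiv, List.range_succ_eq_map, List.map_cons, List.map_map]
    refine congrArg₂ List.cons (by simp) (List.map_congr_left ?_)
    intro k _
    simp only [Function.comp_apply, List.drop_drop]
    rw [show w * (k + 1) = w + w * k by ring]
  · rw [pvChunk, dif_neg (by omega)]
    have h0 : cs.length / w = 0 := Nat.div_eq_of_lt (by omega)
    simp [h0]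
termination_by cs.length
decreasing_by simp; omega

theorem alt_eq_pvChunk (w : Nat) (hw : 0 < w) (cs : List Char) :
    (PySem.List.pyRange 0 ((cs.length : Int) - PySem.Int.mod (cs.length : Int) (w : Int)) (w : Int)).map
      (fun i => String.ofList (PySem.List.slice cs (some i) (some (i + (w : Int)))))
      = pvChunk w cs := by
  have hw' : (0 : Int) < (w : Int) := by exact_mod_cast hw
  set L := cs.length with hL
  set m := L / w with hm
  have hmod : PySem.Int.mod (L : Int) (w : Int) = ((L % w : Nat) : Int) :=
    PySem.Int.mod_natCast L w
  have hdm : w * m + L % w = L := by rw [hm]; exact Nat.div_add_mod L w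
  have hn : (L : Int) - PySem.Int.mod (L : Int) (w : Int) = ((w * m : Nat) : Int) := by
    rw [hmod]
    generalize hq : w * m = q at hdm ⊢
    generalize hr : L % w = r at hdm ⊢
    omega
  rw [hn, PySem.List.pyRange_of_pos _ _ hw']
  by_cases hm0 : m = 0
  · have hnpos : ¬ ((0 : Int) < ((w * m : Nat) : Int)) := by simp [hm0]
    rw [if_neg hnpos]
    have h5 : L % w = L := by simpa [hm0] using hdm
    have hlt : L < w := by
      calc L = L % w := h5.symm
        _ < w := Nat.mod_lt _ hw
    simp [pvChunk_nil_of_lt hlt]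
  · have hpos : (0 : Int) < ((w * m : Nat) : Int) := by
      have : 0 < w * m := Nat.mul_pos hw (Nat.pos_of_ne_zero hm0)
      exact_mod_cast this
    rw [if_pos hpos]
    have hcount : ((((w * m : Nat) : Int) - 0 + (w : Int) - 1) / (w : Int)).toNat = m := by
      have h1 : (((w * m : Nat) : Int) - 0 + (w : Int) - 1) = ((w * m + w - 1 : Nat) : Int) := by
        push_cast; omega
      have h2 : ((w * m + w - 1 : Nat) : Int) / ((w : Nat) : Int) = (((w * m + w - 1) / w : Nat) : Int) := by
        rw [Int.natCast_div]
      have h3 : w * m + w - 1 = w * m + (w - 1) := by omega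
      rw [h1, h2, h3, Nat.mul_add_div hw, Nat.div_eq_of_lt (by omega)]
      simp
    rw [hcount, pvChunk_eq_rangeMap w hw cs, ← hL, ← hm, List.map_map]
    refine List.map_congr_left ?_
    intro k _
    simp only [Function.comp_apply]
    rw [show (0 : Int) + (w : Int) * (k : Int) = ((w * k : Nat) : Int) by push_cast; ring]
    rw [PySem.List.slice_natCast_add]

-- ===== VERDICT (by name: the statement is the Claim_ definition above) =====
theorem get_graphical_representation_spec : Claim_equal_get_graphical_representation := by
  intro image_pixels width height _
  unfold Spec_get_graphical_representation
  unfold get_graphical_representation get_graphical_representation_alt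
  by_cases hw : width ≤ 0
  · simp [hw]
  · have hw' : 0 < width := by omega
    have hwt : 0 < width.toNat := by omega
    rw [if_neg hw, if_neg hw]
    rw [gcrLoop_eq width hw' image_pixels [] [] 0 (by simp) (by simp; omega)]
    have hwi : width = (width.toNat : Int) := by omega
    rw [hwi]
    rw [alt_eq_pvChunk width.toNat hwt]
    simp
    congr 1
    omega
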